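-- pv_equiv track=rewrite | github.com/harsathparvesh0707/AI_HRMS | AIHRMS/hrms_ai/services/enhanced_search_service.py | _filter_by_skills
-- ===== SOURCE A (Python) =====
-- from typing import Dict, Any, List, Optional
--
-- def _filter_by_skills(results: List[Dict], required_skills: List[str]) -> List[Dict]:
--     """Filter results by required skills"""
--     filtered = []
--     for result in results:
--         skill_set = result.get('skill_set', '').lower()
--         tech_group = result.get('tech_group', '').lower()
--
--         has_skills = all(
--             skill.lower() in skill_set or skill.lower() in tech_group
--             for skill in required_skills
--         )
--
--         if has_skills:
--             filtered.append(result)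
--
--     return filtered
-- ===== SOURCE B (Python) =====
-- def _filter_by_skills(results, required_skills):
--     """Filter results by required skills: successively narrow the candidate set."""
--     filtered = list(results)
--     for skill in required_skills:
--         sk = skill.lower()
--         filtered = [r for r in filtered
--                     if sk in r.get('skill_set', '').lower()
--                     or sk in r.get('tech_group', '').lower()]
--     return filtered
-- ===== Notes on version B (the rewrite author's own statement) =====
-- stated objective: alternative
-- what changed: Inverts the loop nesting: instead of one pass over results with an inner all() over skills, B iterates over the skills and repeatedly narrows a candidate list by filtering, lowering each skill once per pass.
import Mathlib
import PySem

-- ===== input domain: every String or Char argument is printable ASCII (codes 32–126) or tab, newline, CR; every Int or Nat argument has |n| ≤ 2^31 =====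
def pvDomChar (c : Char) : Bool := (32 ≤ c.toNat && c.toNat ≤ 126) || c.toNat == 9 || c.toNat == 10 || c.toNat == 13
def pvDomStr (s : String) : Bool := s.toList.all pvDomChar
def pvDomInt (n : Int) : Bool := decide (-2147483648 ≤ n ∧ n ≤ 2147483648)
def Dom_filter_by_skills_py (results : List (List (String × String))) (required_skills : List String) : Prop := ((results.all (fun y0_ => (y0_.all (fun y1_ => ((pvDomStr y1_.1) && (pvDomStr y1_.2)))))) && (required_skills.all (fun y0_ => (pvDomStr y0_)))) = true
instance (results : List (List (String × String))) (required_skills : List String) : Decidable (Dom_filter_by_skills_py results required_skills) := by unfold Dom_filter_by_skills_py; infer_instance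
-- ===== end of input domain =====

-- B inverts the loop nesting: one filtering pass over the shrinking candidate list per skill
-- (objective: alternative decomposition; same asymptotic cost).

-- ===== PORT A =====
def filter_by_skills_py (results : List (List (String × String))) (required_skills : List String) : List (List (String × String)) :=
  results.foldl (fun filtered result =>
    let skill_set := PySem.Str.lower (PySem.Dict.getD (PySem.Dict.mk result) "skill_set" "")
    let tech_group := PySem.Str.lower (PySem.Dict.getD (PySem.Dict.mk result) "tech_group" "")
    let has_skills := required_skills.all (fun skill =>
      PySem.Str.isIn (PySem.Str.lower skill) skill_set || PySem.Str.isIn (PySem.Str.lower skill) tech_group)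
    if has_skills then filtered ++ [result] else filtered) []

-- ===== PORT B =====
def filter_by_skills_py_alt (results : List (List (String × String))) (required_skills : List String) : List (List (String × String)) :=
  required_skills.foldl (fun filtered skill =>
    let sk := PySem.Str.lower skill
    filtered.filter (fun r =>
      PySem.Str.isIn sk (PySem.Str.lower (PySem.Dict.getD (PySem.Dict.mk r) "skill_set" "")) ||
      PySem.Str.isIn sk (PySem.Str.lower (PySem.Dict.getD (PySem.Dict.mk r) "tech_group" "")))) results

-- ===== PRECONDITION & SPEC =====
def Spec_filter_by_skills_py (results : List (List (String × String))) (required_skills : List String) (out : List (List (String × String))) : Prop := out = filter_by_skills_py_alt results required_skills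
instance (results : List (List (String × String))) (required_skills : List String) (out : List (List (String × String))) : Decidable (Spec_filter_by_skills_py results required_skills out) := by unfold Spec_filter_by_skills_py; infer_instance

-- ===== CLAIM (what is proved, stated in full; the proofs are below) =====
def Claim_equal_filter_by_skills_py : Prop := ∀ (results : List (List (String × String))) (required_skills : List String), Dom_filter_by_skills_py results required_skills → Spec_filter_by_skills_py results required_skills (filter_by_skills_py results required_skills)

-- ===== LEMMAS AND PROOFS =====

-- the single per-record, per-skill test both programs perform
def pvMatch (skill : String) (r : List (String × String)) : Bool :=
  PySem.Str.isIn (PySem.Str.lower skill) (PySem.Str.lower (PySem.Dict.getD (PySem.Dict.mk r) "skill_set" "")) ||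
  PySem.Str.isIn (PySem.Str.lower skill) (PySem.Str.lower (PySem.Dict.getD (PySem.Dict.mk r) "tech_group" ""))

-- A's shape: an accumulating append-if loop is a filter
theorem foldl_app_if_eq_filter {α : Type} (p : α → Bool) (xs : List α)
    (acc : List α) :
    xs.foldl (fun acc x => if p x then acc ++ [x] else acc) acc = acc ++ xs.filter p := by
  induction xs generalizing acc with
  | nil => simp
  | cons x xs ih =>
    simp only [List.foldl_cons, List.filter_cons]
    by_cases h : p x = true
    · rw [if_pos h, if_pos h, ih]; simp
    · rw [if_neg h, if_neg h, ih]

-- B's shape: successive filtering passes are one filter by the conjunction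
theorem foldl_filter_eq_filter_all {α σ : Type} (q : σ → α → Bool) (ss : List σ)
    (xs : List α) :
    ss.foldl (fun acc s => acc.filter (q s)) xs
      = xs.filter (fun x => ss.all (fun s => q s x)) := by
  induction ss generalizing xs with
  | nil => simp
  | cons s ss ih =>
    rw [List.foldl_cons, ih, List.filter_filter]
    congr 1
    funext x
    simp [Bool.and_comm]

-- ===== VERDICT (by name: the statement is the Claim_ definition above) =====
theorem filter_by_skills_py_spec : Claim_equal_filter_by_skills_py := by
  intro results required_skills _
  unfold Spec_filter_by_skills_py filter_by_skills_py filter_by_skills_py_alt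
  have hA := foldl_app_if_eq_filter (fun r => required_skills.all (fun s => pvMatch s r)) results []
  have hB := foldl_filter_eq_filter_all (fun s r => pvMatch s r) required_skills results
  simp only [pvMatch] at hA hB
  rw [List.nil_append] at hA
  exact hA.trans hB.symm
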